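-- pv_equiv track=rewrite | github.com/tuanna199/PGC | src/pgc/blastFiltRecord.py | once_key
-- ===== SOURCE A (Python) =====
-- import collections
--
-- def once_key(SliceList):
--     """
--     SliceList
--     [(1, 2), (2, 6), (6, 28), (28, 107), (107, 160), (160, 166), (166, 167)]
--
--     return:
--     [1, 167]
--     """
--     OnceKeys = collections.Counter()
--     for region in SliceList:
--         start, end = region
--         OnceKeys[start] += 1
--         OnceKeys[end] += 1
--
--     OnceList = []
--     for o in OnceKeys:
--         v = OnceKeys[o]
--         if v == 1:
--             OnceList.append(o)
--     return sorted(OnceList)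
-- ===== SOURCE B (Python) =====
-- def once_key(SliceList):
--     # Flatten all endpoints, sort once, then scan the sorted list grouping
--     # consecutive equal values; keep a value iff its run has length 1.
--     flat = sorted(v for region in SliceList for v in region)
--     out = []
--     while flat:
--         x = flat[0]
--         run = 1
--         while run < len(flat) and flat[run] == x:
--             run += 1
--         if run == 1:
--             out.append(x)
--         flat = flat[run:]
--     return out
-- ===== Notes on version B (the rewrite author's own statement) =====
-- stated objective: alternative
-- what changed: Replaces the Counter-then-sort approach by flattening all endpoints, sorting once, and scanning the sorted list by runs of equal values, keeping exactly the values whose run has length 1.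
import Mathlib
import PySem

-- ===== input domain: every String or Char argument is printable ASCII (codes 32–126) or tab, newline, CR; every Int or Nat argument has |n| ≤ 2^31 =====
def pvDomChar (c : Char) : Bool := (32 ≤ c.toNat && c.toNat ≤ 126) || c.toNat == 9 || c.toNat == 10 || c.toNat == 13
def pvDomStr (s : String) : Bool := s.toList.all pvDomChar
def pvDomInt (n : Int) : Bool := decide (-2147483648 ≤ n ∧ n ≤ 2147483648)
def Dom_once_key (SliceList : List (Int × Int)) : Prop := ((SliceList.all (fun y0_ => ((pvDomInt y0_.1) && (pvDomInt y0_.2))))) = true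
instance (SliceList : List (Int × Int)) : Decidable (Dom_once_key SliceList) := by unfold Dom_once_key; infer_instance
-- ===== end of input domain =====

-- B flattens all endpoints, sorts once, and scans runs of equal values instead of
-- building a Counter and sorting the once-keys afterwards (alternative decomposition, same cost).

-- ===== PORT A =====
def once_key (SliceList : List (Int × Int)) : List Int :=
  let OnceKeys : PySem.Dict Int Int :=
    SliceList.foldl
      (fun d region => (d.modify region.1 0 (· + 1)).modify region.2 0 (· + 1))
      PySem.Dict.empty
  let OnceList : List Int :=
    OnceKeys.keys.foldl
      (fun acc o => if OnceKeys.getD o 0 == 1 then acc ++ [o] else acc) []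
  PySem.List.sorted OnceList (fun x => x) false

-- ===== PORT B =====
-- the `while flat:` run-scanning loop of Source B: `run` counts the leading run of
-- equal values, `flat = flat[run:]` is the drop of that run
def pvScanOnce : List Int → List Int
  | [] => []
  | x :: tail =>
    let run := (tail.takeWhile (fun y => y == x)).length + 1
    if run == 1 then x :: pvScanOnce (tail.dropWhile (fun y => y == x))
    else pvScanOnce (tail.dropWhile (fun y => y == x))
termination_by l => l.length
decreasing_by
  all_goals exact Nat.lt_succ_of_le (List.length_dropWhile_le _ _)

def once_key_alt (SliceList : List (Int × Int)) : List Int :=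
  pvScanOnce
    (PySem.List.sorted (SliceList.flatMap (fun region => [region.1, region.2]))
      (fun v => v) false)

-- ===== PRECONDITION & SPEC =====
def Spec_once_key (SliceList : List (Int × Int)) (out : List Int) : Prop := out = once_key_alt SliceList
instance (SliceList : List (Int × Int)) (out : List Int) : Decidable (Spec_once_key SliceList out) := by unfold Spec_once_key; infer_instance

-- ===== CLAIM (what is proved, stated in full; the proofs are below) =====
def Claim_equal_once_key : Prop := ∀ (SliceList : List (Int × Int)), Dom_once_key SliceList → Spec_once_key SliceList (once_key SliceList)

-- ===== LEMMAS AND PROOFS =====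

-- A's two-modifies-per-pair counting loop is the plain counting loop over the flattened endpoint list
theorem pv_dict_gen (L : List (Int × Int)) (d : PySem.Dict Int Int) :
    L.foldl (fun d region => (d.modify region.1 0 (· + 1)).modify region.2 0 (· + 1)) d
      = (L.flatMap (fun region => [region.1, region.2])).foldl
          (fun d x => d.modify x 0 (· + 1)) d := by
  induction L generalizing d with
  | nil => rfl
  | cons r t ih => simp [List.flatMap_cons, ih]

-- on a ≤-sorted x :: tail, x does not reappear after the leading run of x's
theorem pv_not_mem_drop (x : Int) (tail : List Int)
    (hs : (x :: tail).Pairwise (· ≤ ·)) : x ∉ tail.dropWhile (fun y => y == x) := by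
  intro hmem
  have htail : tail.Pairwise (· ≤ ·) := (List.pairwise_cons.mp hs).2
  have hxle : ∀ y ∈ tail, x ≤ y := (List.pairwise_cons.mp hs).1
  have hrs := List.dropWhile_sublist (l := tail) (fun y => y == x)
  have hrestpw := htail.sublist hrs
  cases hre : tail.dropWhile (fun y => y == x) with
  | nil => simp [hre] at hmem
  | cons y r' =>
    have hyx : (y == x) = false := by
      have h := List.head_dropWhile_not (fun y => y == x) (l := tail) (by rw [hre]; simp)
      simpa [hre] using h
    rw [hre] at hmem hrestpw
    rcases List.mem_cons.mp hmem with h | h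
    · simp [h] at hyx
    · have hylex : y ≤ x := (List.pairwise_cons.mp hrestpw).1 x h
      have hxley : x ≤ y := hxle y (hrs.mem (by rw [hre]; simp))
      have : y = x := le_antisymm hylex hxley
      simp [this] at hyx

-- on a ≤-sorted list, the run scan keeps exactly the values occurring once
theorem pv_scan_eq (l : List Int) (hs : l.Pairwise (· ≤ ·)) :
    pvScanOnce l = l.filter (fun v => l.count v == 1) := by
  induction l using pvScanOnce.induct with
  | case1 => simp [pvScanOnce]
  | case2 x tail run hrun ih =>
    have hrun' : ((tail.takeWhile (fun y => y == x)).length + 1 == 1) = true := hrun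
    have hk : tail.takeWhile (fun y => y == x) = [] := by
      have h0 : (tail.takeWhile (fun y => y == x)).length = 0 := by simpa using hrun'
      exact List.eq_nil_of_length_eq_zero h0
    have hrest : tail.dropWhile (fun y => y == x) = tail := by
      have := List.takeWhile_append_dropWhile (p := fun y => y == x) (l := tail)
      rw [hk] at this; simpa using this
    have hxnot : x ∉ tail := by
      have := pv_not_mem_drop x tail hs; rwa [hrest] at this
    have htail : tail.Pairwise (· ≤ ·) := (List.pairwise_cons.mp hs).2
    have hcx : (x :: tail).count x = 1 := by
      simp [List.count_eq_zero.mpr hxnot]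
    rw [pvScanOnce, if_pos hrun', hrest, List.filter_cons]
    have hpx : (List.count x (x :: tail) == 1) = true := by simp [hcx]
    rw [hpx]
    simp only [if_true]
    congr 1
    have ih' := ih (by rwa [hrest])
    rw [hrest] at ih'
    rw [ih']
    apply List.filter_congr
    intro v hv
    have hvne : x ≠ v := fun h => hxnot (h ▸ hv)
    simp [hvne]
  | case3 x tail run hrun ih =>
    have hrun' : ¬ ((tail.takeWhile (fun y => y == x)).length + 1 == 1) = true := hrun
    have hkne : tail.takeWhile (fun y => y == x) ≠ [] := by
      intro h; rw [h] at hrun'; simp at hrun'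
    have htd : tail.takeWhile (fun y => y == x) ++ tail.dropWhile (fun y => y == x) = tail :=
      List.takeWhile_append_dropWhile
    have hkx : ∀ y ∈ tail.takeWhile (fun y => y == x), y = x := fun y hy => by
      have := List.mem_takeWhile_imp hy; simpa using this
    have hxnot : x ∉ tail.dropWhile (fun y => y == x) := pv_not_mem_drop x tail hs
    have htail : tail.Pairwise (· ≤ ·) := (List.pairwise_cons.mp hs).2
    have hrestpw : (tail.dropWhile (fun y => y == x)).Pairwise (· ≤ ·) :=
      htail.sublist (List.dropWhile_sublist _)
    have hckx : (tail.takeWhile (fun y => y == x)).count x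
        = (tail.takeWhile (fun y => y == x)).length :=
      List.count_eq_length.mpr (fun b hb => (hkx b hb).symm)
    have h1 : List.count x tail = (tail.takeWhile (fun y => y == x)).length := by
      conv_lhs => rw [← htd]
      rw [List.count_append, hckx, List.count_eq_zero.mpr hxnot]
      omega
    have hcx : (x :: tail).count x = (tail.takeWhile (fun y => y == x)).length + 1 := by
      rw [List.count_cons_self, h1]
    have hlne : (tail.takeWhile (fun y => y == x)).length ≠ 0 :=
      fun h => hkne (List.eq_nil_of_length_eq_zero h)
    have hpx : (List.count x (x :: tail) == 1) = false := by
      rw [hcx]; simp [hlne]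
    rw [pvScanOnce, if_neg hrun', List.filter_cons, hpx]
    simp only [Bool.false_eq_true, if_false]
    rw [ih hrestpw]
    set p : Int → Bool := fun v => List.count v (x :: tail) == 1 with hpdef
    conv_rhs => rw [← htd]
    rw [List.filter_append]
    have hfk : (tail.takeWhile (fun y => y == x)).filter p = [] := by
      rw [List.filter_eq_nil_iff]
      intro v hv
      simp only [hpdef]
      rw [hkx v hv, hpx]; simp
    rw [hfk, List.nil_append]
    apply List.filter_congr
    intro v hv
    have hvne : v ≠ x := fun h => hxnot (h ▸ hv)
    have hck : (tail.takeWhile (fun y => y == x)).count v = 0 :=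
      List.count_eq_zero.mpr (fun h => hvne (hkx v h))
    have hcnt : List.count v (x :: tail) = List.count v (tail.dropWhile (fun y => y == x)) := by
      have h2 : List.count v tail = List.count v (tail.dropWhile (fun y => y == x)) := by
        conv_lhs => rw [← htd]
        rw [List.count_append, hck, Nat.zero_add]
      rw [List.count_cons_of_ne (Ne.symm hvne), h2]
    simp only [hpdef]
    rw [hcnt]

-- ===== VERDICT (by name: the statement is the Claim_ definition above) =====
theorem once_key_spec : Claim_equal_once_key := by
  unfold Claim_equal_once_key
  intro L _
  unfold Spec_once_key once_key once_key_alt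
  set xs : List Int := L.flatMap (fun region => [region.1, region.2]) with hxs
  set s : List Int := PySem.List.sorted xs (fun v => v) false with hsdef
  have hd : L.foldl (fun d region => (d.modify region.1 0 (· + 1)).modify region.2 0 (· + 1))
      PySem.Dict.empty = PySem.Dict.counter xs := by
    rw [pv_dict_gen]; rfl
  simp only [hd, PySem.Dict.keys_counter, PySem.List.foldl_append_if_eq_filter,
    List.nil_append, PySem.Dict.getD_counter]
  -- B side: the run scan of the sorted flat list keeps exactly the once-values
  have hspw : s.Pairwise (· ≤ ·) := PySem.List.sorted_pairwise xs (fun v => v)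
  rw [pv_scan_eq s hspw]
  have hperm : s.Perm xs := PySem.List.sorted_perm xs (fun v => v) false
  -- both sides are sorted lists; show they are permutations of each other
  have hnd1 : ((PySem.Set.ofList xs).filter (fun o => ((xs.count o : Int) == 1))).Nodup :=
    (PySem.Set.nodup_ofList xs).filter _
  have hnd2 : (s.filter (fun v => (s.count v == 1))).Nodup := by
    rw [List.nodup_iff_count_le_one]
    intro a
    by_cases hpa : (s.count a == 1) = true
    · have h := List.count_filter (p := fun v => List.count v s == 1) (l := s) (a := a) hpa
      rw [h]
      have h1 : List.count a s = 1 := by simpa using hpa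
      omega
    · have : a ∉ s.filter (fun v => (s.count v == 1)) := by
        intro h; exact hpa ((List.mem_filter.mp h).2)
      rw [List.count_eq_zero.mpr this]; omega
  have hmem : ∀ a : Int, a ∈ (PySem.Set.ofList xs).filter (fun o => ((xs.count o : Int) == 1))
      ↔ a ∈ s.filter (fun v => (s.count v == 1)) := by
    intro a
    simp only [List.mem_filter, PySem.Set.mem_ofList, hperm.mem_iff, hperm.count_eq]
    constructor
    · rintro ⟨h1, h2⟩
      exact ⟨h1, by simpa using h2⟩
    · rintro ⟨h1, h2⟩
      exact ⟨h1, by simpa using h2⟩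
  have hpm : (PySem.List.sorted ((PySem.Set.ofList xs).filter (fun o => ((xs.count o : Int) == 1)))
      (fun x => x) false).Perm (s.filter (fun v => (s.count v == 1))) := by
    refine (PySem.List.sorted_perm _ _ _).trans ?_
    exact (List.perm_ext_iff_of_nodup hnd1 hnd2).mpr hmem
  refine List.Perm.eq_of_pairwise (fun a b _ _ hab hba => le_antisymm hab hba) ?_ ?_ hpm
  · exact PySem.List.sorted_pairwise _ (fun x => x)
  · exact hspw.filter _
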